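-- pv_equiv track=rewrite | github.com/Michal0ss/WDI | WDI_algo/Zestaw_5/z160.py | zad_160
-- ===== SOURCE A (Python) =====
-- def pole(proste) -> int:
--     return (proste[1]-proste[0]) ** 2
--
-- def nachodza(k1,k2:tuple) -> bool:
--     down = k2[3]<k1[2]
--     up = k2[2]>k1[3]
--     left = k2[1]<k1[0]
--     right = k2[0]>k1[1]
--
--     return not (left or right or up or down)
--
-- def zad_160(t):
--     N= 13
--     wymagane_pole = 2012
--
--     def rek(idx=0, szukane_pole = wymagane_pole, kwadraty =[]): # lista kwadratow ktore na siebie nie nachodza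
--
--         if len(kwadraty) == N and szukane_pole == 0:
--             return True
--
--         if idx == len(t) or len(kwadraty)>N or szukane_pole < 0:
--             return False
--
--         if not any(nachodza(t[idx], kwadrat) for kwadrat in kwadraty):
--             if rek(idx+1, szukane_pole-pole(t[idx]), kwadraty + [t[idx]]):
--                 return True
--
--         return rek(idx+1, szukane_pole, kwadraty)
--
--
--     return rek()
-- ===== SOURCE B (Python) =====
-- def pole(proste) -> int:
--     return (proste[1] - proste[0]) ** 2
--
--
-- def nachodza(k1, k2: tuple) -> bool:
--     down = k2[3] < k1[2]
--     up = k2[2] > k1[3]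
--     left = k2[1] < k1[0]
--     right = k2[0] > k1[1]
--     return not (left or right or up or down)
--
--
-- def zad_160(t):
--     # iterative depth-first search with an explicit stack of frames
--     n = len(t)
--     stack = [(0, 2012, [])]
--     while stack:
--         idx, need, chosen = stack.pop()
--         if len(chosen) == 13 and need == 0:
--             return True
--         if idx >= n or len(chosen) > 13 or need < 0:
--             continue
--         k = t[idx]
--         stack.append((idx + 1, need, chosen))
--         if all(not nachodza(k, c) for c in chosen):
--             stack.append((idx + 1, need - pole(k), chosen + [k]))
--     return False
-- ===== Notes on version B (the rewrite author's own statement) =====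
-- stated objective: alternative
-- what changed: Replaces A's recursive backtracking closure (implicit call stack, early returns) by an iterative depth-first search over an explicit stack of (index, needed-area, chosen-squares) frames popped in a while loop; same search tree and pruning, so the same boolean and the same cost.
import Mathlib
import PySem

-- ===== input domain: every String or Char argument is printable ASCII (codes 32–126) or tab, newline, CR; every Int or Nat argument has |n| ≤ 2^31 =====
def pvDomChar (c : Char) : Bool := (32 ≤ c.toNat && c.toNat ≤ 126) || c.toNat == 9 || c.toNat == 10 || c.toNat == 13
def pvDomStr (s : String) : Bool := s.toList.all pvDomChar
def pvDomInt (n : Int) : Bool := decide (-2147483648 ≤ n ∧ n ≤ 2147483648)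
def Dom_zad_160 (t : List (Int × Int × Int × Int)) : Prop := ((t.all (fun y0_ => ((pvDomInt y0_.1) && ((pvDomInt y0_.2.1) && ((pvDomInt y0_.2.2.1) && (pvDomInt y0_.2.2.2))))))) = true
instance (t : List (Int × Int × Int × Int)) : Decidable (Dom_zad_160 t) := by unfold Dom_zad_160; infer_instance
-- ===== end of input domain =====

-- B replaces A's recursive backtracking by an iterative depth-first search over an
-- explicit stack of (index, needed area, chosen squares) frames (same cost; objective: alternative).

-- ===== PORT A =====
-- pole(proste): area of the square
def pvPole (p : Int × Int × Int × Int) : Int := (p.2.1 - p.1) ^ 2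

-- nachodza(k1, k2): do the two squares overlap
def pvNachodza (k1 k2 : Int × Int × Int × Int) : Bool :=
  let down := decide (k2.2.2.2 < k1.2.2.1)
  let up := decide (k2.2.2.1 > k1.2.2.2)
  let left := decide (k2.2.1 < k1.1)
  let right := decide (k2.1 > k1.2.1)
  !(left || right || up || down)

-- rek(idx, szukane_pole, kwadraty): the suffix t[idx:] is passed as the list `rest`
-- (so `idx == len(t)` is `rest = []` and `t[idx]` is the head of `rest`)
def pvRek (rest : List (Int × Int × Int × Int)) (sz : Int)
    (kw : List (Int × Int × Int × Int)) : Bool :=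
  if kw.length == 13 && sz == 0 then true
  else
    match rest with
    | [] => false
    | x :: rs =>
      if decide (kw.length > 13) || decide (sz < 0) then false
      else if !(kw.any (fun kwadrat => pvNachodza x kwadrat)) then
        if pvRek rs (sz - pvPole x) (kw ++ [x]) then true else pvRek rs sz kw
      else pvRek rs sz kw

def zad_160 (t : List (Int × Int × Int × Int)) : Bool := pvRek t 2012 []

-- ===== PORT B =====
-- weight of the pending stack: each frame at index idx costs 3^(len t - idx);
-- popping a frame pushes at most two frames at idx+1, so the weight strictly drops
def pvStackWeight (t : List (Int × Int × Int × Int))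
    (stack : List (Nat × Int × List (Int × Int × Int × Int))) : Nat :=
  (stack.map (fun f => 3 ^ (t.length - f.1))).sum

-- the while-loop of B: pop a frame, test it, push its successors
def pvLoop (t : List (Int × Int × Int × Int))
    (stack : List (Nat × Int × List (Int × Int × Int × Int))) : Bool :=
  match stack with
  | [] => false
  | (idx, need, chosen) :: s =>
    if chosen.length == 13 && need == 0 then true
    else if decide (t.length ≤ idx) || decide (chosen.length > 13) || decide (need < 0) then
      pvLoop t s
    else
      let k := t.getD idx (0, 0, 0, 0)  -- t[idx]; the guard above ensures idx < len t
      if chosen.all (fun c => !pvNachodza k c) then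
        pvLoop t ((idx + 1, need - pvPole k, chosen ++ [k]) :: (idx + 1, need, chosen) :: s)
      else
        pvLoop t ((idx + 1, need, chosen) :: s)
  termination_by pvStackWeight t stack
  decreasing_by
  · simp only [pvStackWeight, List.map_cons, List.sum_cons]
    have h3 : 0 < 3 ^ (t.length - idx) := pow_pos (by norm_num : (0:ℕ) < 3) _
    omega
  · rename_i hguard _
    simp only [decide_eq_true_eq, Bool.or_eq_true, not_or] at hguard
    have hsub : t.length - idx = (t.length - (idx + 1)) + 1 := by omega
    simp only [pvStackWeight, List.map_cons, List.sum_cons, hsub, pow_succ]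
    have h3 : 0 < 3 ^ (t.length - (idx + 1)) := pow_pos (by norm_num : (0:ℕ) < 3) _
    omega
  · rename_i hguard _
    simp only [decide_eq_true_eq, Bool.or_eq_true, not_or] at hguard
    have hsub : t.length - idx = (t.length - (idx + 1)) + 1 := by omega
    simp only [pvStackWeight, List.map_cons, List.sum_cons, hsub, pow_succ]
    have h3 : 0 < 3 ^ (t.length - (idx + 1)) := pow_pos (by norm_num : (0:ℕ) < 3) _
    omega

def zad_160_alt (t : List (Int × Int × Int × Int)) : Bool := pvLoop t [(0, 2012, [])]

-- ===== PRECONDITION & SPEC =====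
def Spec_zad_160 (t : List (Int × Int × Int × Int)) (out : Bool) : Prop := out = zad_160_alt t
instance (t : List (Int × Int × Int × Int)) (out : Bool) : Decidable (Spec_zad_160 t out) := by unfold Spec_zad_160; infer_instance

-- ===== CLAIM (what is proved, stated in full; the proofs are below) =====
def Claim_equal_zad_160 : Prop := ∀ (t : List (Int × Int × Int × Int)), Dom_zad_160 t → Spec_zad_160 t (zad_160 t)

-- ===== LEMMAS AND PROOFS =====

lemma pv_all_not_eq_not_any (l : List (Int × Int × Int × Int))
    (p : (Int × Int × Int × Int) → Bool) :
    l.all (fun c => !p c) = !(l.any p) := by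
  induction l with
  | nil => rfl
  | cons x xs ih => simp [List.all_cons, List.any_cons, ih, Bool.not_or]

-- each stack frame (idx, need, chosen) stands for the backtracking call rek(idx, need, chosen)
lemma pvLoop_eq_any (t : List (Int × Int × Int × Int))
    (stack : List (Nat × Int × List (Int × Int × Int × Int))) :
    pvLoop t stack = stack.any (fun f => pvRek (t.drop f.1) f.2.1 f.2.2) := by
  induction stack using pvLoop.induct (t := t) with
  | case1 =>
    rw [pvLoop]
    rfl
  | case2 idx need chosen s hsucc =>
    rw [pvLoop, if_pos hsucc, List.any_cons, pvRek.eq_def, if_pos hsucc]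
    simp
  | case3 idx need chosen s hsucc hguard ih =>
    rw [pvLoop, if_neg hsucc, if_pos hguard, ih, List.any_cons]
    have hrek : pvRek (t.drop idx) need chosen = false := by
      simp only [decide_eq_true_eq, Bool.or_eq_true] at hguard
      generalize hd : t.drop idx = rest
      cases rest with
      | nil => rw [pvRek, if_neg hsucc]
      | cons x rs =>
        rcases hguard with (h | h) | h
        · exfalso
          have hnil : t.drop idx = [] := List.drop_eq_nil_of_le h
          rw [hnil] at hd
          exact List.cons_ne_nil x rs hd.symm
        · rw [pvRek, if_neg hsucc,
            if_pos (show (decide (List.length chosen > 13) || decide (need < 0)) = true by simp [h])]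
        · rw [pvRek, if_neg hsucc,
            if_pos (show (decide (List.length chosen > 13) || decide (need < 0)) = true by simp [h])]
    rw [hrek]
    simp
  | case4 idx need chosen s hsucc hguard k hall ih =>
    have hk0 : k = t.getD idx (0, 0, 0, 0) := rfl
    rw [pvLoop, if_neg hsucc, if_neg hguard, if_pos hall, ih]
    simp only [hk0] at hall
    simp only [decide_eq_true_eq, Bool.or_eq_true, not_or] at hguard
    have hlt : idx < t.length := by omega
    have hdrop : t.drop idx = t[idx] :: t.drop (idx + 1) := List.drop_eq_getElem_cons hlt
    have hk : t.getD idx (0, 0, 0, 0) = t[idx] := List.getD_eq_getElem t _ hlt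
    have hnotany : (!(chosen.any fun kwadrat => pvNachodza (t.getD idx (0, 0, 0, 0)) kwadrat)) = true := by
      rw [← pv_all_not_eq_not_any]
      exact hall
    have hrek : pvRek (t.drop idx) need chosen =
        (pvRek (t.drop (idx + 1)) (need - pvPole (t.getD idx (0, 0, 0, 0))) (chosen ++ [t.getD idx (0, 0, 0, 0)]) ||
          pvRek (t.drop (idx + 1)) need chosen) := by
      rw [hdrop, pvRek, if_neg hsucc]
      rw [if_neg (show ¬(decide (List.length chosen > 13) || decide (need < 0)) = true by simp only [decide_eq_true_eq, Bool.or_eq_true]; omega)]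
      rw [← hk, if_pos hnotany]
      cases hb : pvRek (t.drop (idx + 1)) (need - pvPole (t.getD idx (0, 0, 0, 0))) (chosen ++ [t.getD idx (0, 0, 0, 0)]) <;> simp
    simp only [List.any_cons, hrek, hk0]
    simp [Bool.or_assoc]
  | case5 idx need chosen s hsucc hguard k hall ih =>
    have hk0 : k = t.getD idx (0, 0, 0, 0) := rfl
    rw [pvLoop, if_neg hsucc, if_neg hguard, if_neg hall, ih]
    simp only [hk0] at hall
    simp only [decide_eq_true_eq, Bool.or_eq_true, not_or] at hguard
    have hlt : idx < t.length := by omega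
    have hdrop : t.drop idx = t[idx] :: t.drop (idx + 1) := List.drop_eq_getElem_cons hlt
    have hk : t.getD idx (0, 0, 0, 0) = t[idx] := List.getD_eq_getElem t _ hlt
    have hnotany : (!(chosen.any fun kwadrat => pvNachodza (t.getD idx (0, 0, 0, 0)) kwadrat)) = false := by
      rw [← pv_all_not_eq_not_any]
      exact Bool.eq_false_iff.mpr hall
    have hrek : pvRek (t.drop idx) need chosen = pvRek (t.drop (idx + 1)) need chosen := by
      rw [hdrop, pvRek, if_neg hsucc]
      rw [if_neg (show ¬(decide (List.length chosen > 13) || decide (need < 0)) = true by simp only [decide_eq_true_eq, Bool.or_eq_true]; omega)]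
      rw [← hk, if_neg (fun hcon => by rw [hcon] at hnotany; exact absurd hnotany (by decide))]
    simp [List.any_cons, hrek]

-- ===== VERDICT (by name: the statement is the Claim_ definition above) =====
theorem zad_160_spec : Claim_equal_zad_160 := by
  intro t _
  unfold Spec_zad_160 zad_160 zad_160_alt
  rw [pvLoop_eq_any]
  simp
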